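-- pv_equiv track=rewrite | github.com/JZHeadley/SemEval2019-SentiMix | semeval/metrics/metrics.py | getSentimentCounts
-- ===== SOURCE A (Python) =====
-- def getSentimentCounts(data):
--    posSenti = []
--    negSenti = []
--    neutSenti = []
--    spanglishData = []
--
--    for instance in data:
--       spanglishData.append(instance)
--
--       if (instance["sentiment"] == "positive"):
--          posSenti.append(instance)
--       elif (instance["sentiment"] == "negative"):
--          negSenti.append(instance)
--       elif (instance["sentiment"] == "neutral"):
--          neutSenti.append(instance)
--
--    return len(posSenti), len(neutSenti), len(negSenti)
-- ===== SOURCE B (Python) =====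
-- def getSentimentCounts(data):
--     sents = [instance["sentiment"] for instance in data]
--     return sents.count("positive"), sents.count("neutral"), sents.count("negative")
-- ===== Notes on version B (the rewrite author's own statement) =====
-- stated objective: simpler
-- what changed: Replaces the single accumulator loop with three lists (plus an unused copy of the data) and the if/elif chain by a projection of the sentiment labels followed by three list.count scans.
import Mathlib
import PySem

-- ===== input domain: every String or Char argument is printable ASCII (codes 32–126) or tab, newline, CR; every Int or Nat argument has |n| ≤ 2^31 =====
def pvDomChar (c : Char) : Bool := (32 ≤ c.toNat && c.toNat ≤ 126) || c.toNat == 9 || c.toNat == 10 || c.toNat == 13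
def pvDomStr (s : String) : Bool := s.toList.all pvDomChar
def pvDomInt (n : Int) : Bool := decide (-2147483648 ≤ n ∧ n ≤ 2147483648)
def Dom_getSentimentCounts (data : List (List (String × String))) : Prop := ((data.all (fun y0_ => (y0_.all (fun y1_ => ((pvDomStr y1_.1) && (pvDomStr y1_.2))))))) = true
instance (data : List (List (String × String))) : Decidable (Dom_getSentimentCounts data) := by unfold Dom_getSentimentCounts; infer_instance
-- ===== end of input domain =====

-- B replaces A's accumulator loop (three lists plus an unused copy of the data) and its
-- if/elif chain by a projection of the sentiment labels followed by three count scans (simpler).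


-- ===== PORT A =====
-- instance["sentiment"]: first-match lookup in the association list; total form used
-- under Pre_ (key present), where it is exact.
def pvSent (inst : List (String × String)) : String :=
  PySem.Dict.getD (PySem.Dict.mk inst) "sentiment" ""

def getSentimentCounts (data : List (List (String × String))) : Int × Int × Int :=
  let st := data.foldl
    (fun (st : List (List (String × String)) × List (List (String × String)) ×
               List (List (String × String)) × List (List (String × String))) inst =>
      let (pos, neg, neut, span) := st
      let span := span ++ [inst]
      if pvSent inst = "positive" then (pos ++ [inst], neg, neut, span)
      else if pvSent inst = "negative" then (pos, neg ++ [inst], neut, span)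
      else if pvSent inst = "neutral" then (pos, neg, neut ++ [inst], span)
      else (pos, neg, neut, span))
    ([], [], [], [])
  ((st.1.length : Int), (st.2.2.1.length : Int), (st.2.1.length : Int))

-- ===== PORT B =====
def getSentimentCounts_alt (data : List (List (String × String))) : Int × Int × Int :=
  let sents := data.map pvSent
  ((PySem.List.count sents "positive" : Int),
   (PySem.List.count sents "neutral" : Int),
   (PySem.List.count sents "negative" : Int))

-- ===== PRECONDITION & SPEC =====
-- Pre_ excludes exactly the inputs where some instance lacks the key "sentiment",
-- on which the Python A raises KeyError.
def Pre_getSentimentCounts (data : List (List (String × String))) : Prop :=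
  (data.all (fun inst => inst.any (fun kv => kv.1 == "sentiment"))) = true
instance (data : List (List (String × String))) : Decidable (Pre_getSentimentCounts data) := by
  unfold Pre_getSentimentCounts; infer_instance

def pvWitness_getSentimentCounts : (List (List (String × String))) :=
  [[("sentiment", "positive")], [("sentiment", "neutral"), ("lang", "es")]]

def Spec_getSentimentCounts (data : List (List (String × String))) (out : Int × Int × Int) : Prop := out = getSentimentCounts_alt data
instance (data : List (List (String × String))) (out : Int × Int × Int) : Decidable (Spec_getSentimentCounts data out) := by unfold Spec_getSentimentCounts; infer_instance

-- ===== CLAIM (what is proved, stated in full; the proofs are below) =====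
def Claim_equal_getSentimentCounts : Prop := ∀ (data : List (List (String × String))), Dom_getSentimentCounts data → Pre_getSentimentCounts data → Spec_getSentimentCounts data (getSentimentCounts data)

-- ===== LEMMAS AND PROOFS =====

-- A's loop: the lengths of the three lists count each label among the sentiments.
theorem A_loop_len (data : List (List (String × String)))
    (p n nt sp : List (List (String × String))) :
    let f := (fun (st : List (List (String × String)) × List (List (String × String)) ×
                 List (List (String × String)) × List (List (String × String))) inst =>
        let (pos, neg, neut, span) := st
        let span := span ++ [inst]
        if pvSent inst = "positive" then (pos ++ [inst], neg, neut, span)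
        else if pvSent inst = "negative" then (pos, neg ++ [inst], neut, span)
        else if pvSent inst = "neutral" then (pos, neg, neut ++ [inst], span)
        else (pos, neg, neut, span))
    (data.foldl f (p, n, nt, sp)).1.length = p.length + (data.map pvSent).count "positive" ∧
    (data.foldl f (p, n, nt, sp)).2.1.length = n.length + (data.map pvSent).count "negative" ∧
    (data.foldl f (p, n, nt, sp)).2.2.1.length = nt.length + (data.map pvSent).count "neutral" := by
  intro f
  induction data generalizing p n nt sp with
  | nil => simp
  | cons x xs ih =>
    simp only [List.foldl_cons, List.map_cons, List.count_cons]
    by_cases h1 : pvSent x = "positive"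
    · have := ih (p ++ [x]) n nt (sp ++ [x])
      simp [f, h1] at this ⊢
      omega
    · by_cases h2 : pvSent x = "negative"
      · have := ih p (n ++ [x]) nt (sp ++ [x])
        simp [f, h2] at this ⊢
        omega
      · by_cases h3 : pvSent x = "neutral"
        · have := ih p n (nt ++ [x]) (sp ++ [x])
          simp [f, h3] at this ⊢
          omega
        · have := ih p n nt (sp ++ [x])
          simp [f, h1, h2, h3] at this ⊢
          omega

-- ===== VERDICT (by name: the statement is the Claim_ definition above) =====
theorem getSentimentCounts_spec : Claim_equal_getSentimentCounts := by
  intro data _ _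
  unfold Spec_getSentimentCounts getSentimentCounts getSentimentCounts_alt
  have hA := A_loop_len data [] [] [] []
  simp only [List.length_nil, Nat.zero_add] at hA
  obtain ⟨h1, h2, h3⟩ := hA
  simp only [h1, h2, h3, PySem.List.count_eq]
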